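-- pv_equiv track=rewrite | github.com/ChasFletch/girlfriend-guide | pipeline/opponents.py | pick_players_to_scout
-- ===== SOURCE A (Python) =====
-- SCOUT_COUNT = 3
--
-- def pick_players_to_scout(roster: list[dict], already_scouted: list[str], count: int = SCOUT_COUNT) -> list[dict]:
--     """
--     Pick players to scout, prioritizing:
--     1. Players we haven't researched yet
--     2. Forwards and midfielders (more interesting for the audience)
--     """
--     # Filter out already-scouted players
--     unscouted = [p for p in roster if p.get("name", "") not in already_scouted]
--
--     if not unscouted:
--         # Everyone's been scouted — skip
--         return []
--
--     # Sort: forwards first, then midfielders, then defenders, then goalkeepers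
--     position_priority = {"forward": 0, "midfielder": 1, "defender": 2, "goalkeeper": 3}
--
--     def sort_key(p):
--         pos = p.get("position", "").lower()
--         for key, val in position_priority.items():
--             if key in pos:
--                 return val
--         return 4
--
--     unscouted.sort(key=sort_key)
--
--     return unscouted[:count]
-- ===== SOURCE B (Python) =====
-- SCOUT_COUNT = 3
--
-- def _priority(p):
--     pos = p.get("position", "").lower()
--     for key, val in (("forward", 0), ("midfielder", 1), ("defender", 2), ("goalkeeper", 3)):
--         if key in pos:
--             return val
--     return 4
--
-- def pick_players_to_scout(roster: list[dict], already_scouted: list[str], count: int = SCOUT_COUNT) -> list[dict]: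
--     # One pass: drop scouted players and distribute the rest into priority buckets,
--     # then concatenate the buckets (same stable order as sorting by priority).
--     buckets = [[], [], [], [], []]
--     for p in roster:
--         if p.get("name", "") not in already_scouted:
--             buckets[_priority(p)].append(p)
--     result = [p for bucket in buckets for p in bucket]
--     return result[:count]
-- ===== Notes on version B (the rewrite author's own statement) =====
-- stated objective: alternative
-- what changed: Replaces filter-then-stable-comparison-sort with a single pass that distributes unscouted players into five priority buckets and concatenates them, producing the same stable order without sorting.
import Mathlib
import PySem

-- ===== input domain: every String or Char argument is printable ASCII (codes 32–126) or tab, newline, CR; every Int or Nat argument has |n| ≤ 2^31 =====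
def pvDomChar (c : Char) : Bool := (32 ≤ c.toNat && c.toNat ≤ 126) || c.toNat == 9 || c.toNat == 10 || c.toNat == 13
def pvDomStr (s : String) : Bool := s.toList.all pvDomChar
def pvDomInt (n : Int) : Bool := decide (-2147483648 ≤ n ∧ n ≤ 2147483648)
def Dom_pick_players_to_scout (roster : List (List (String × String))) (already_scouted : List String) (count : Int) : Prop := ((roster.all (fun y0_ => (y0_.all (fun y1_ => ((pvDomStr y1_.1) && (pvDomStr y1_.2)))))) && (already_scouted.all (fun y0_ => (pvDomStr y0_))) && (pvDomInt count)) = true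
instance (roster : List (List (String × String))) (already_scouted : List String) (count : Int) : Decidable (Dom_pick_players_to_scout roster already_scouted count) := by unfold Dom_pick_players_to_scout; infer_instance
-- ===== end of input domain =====

-- B replaces A's filter + stable sort by priority with a one-pass bucket distribution (alternative decomposition, same results).


-- ===== PORT A =====
-- the loop 'for key, val in position_priority.items(): if key in pos: return val' / 'return 4';
-- this helper is shared by both ports: A's sort_key and B's _priority are character-identical Python
def pvPrioLoop (items : List (String × Int)) (pos : String) : Int :=
  match items with
  | [] => 4
  | (key, val) :: rest => if PySem.Str.isIn key pos then val else pvPrioLoop rest pos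

def pvSortKey (p : List (String × String)) : Int :=
  pvPrioLoop [("forward", 0), ("midfielder", 1), ("defender", 2), ("goalkeeper", 3)]
    (PySem.Str.lower (PySem.Dict.getD (PySem.Dict.mk p) "position" ""))

def pick_players_to_scout (roster : List (List (String × String))) (already_scouted : List String) (count : Int) : List (List (String × String)) :=
  let unscouted := roster.filter (fun p => !(already_scouted.contains (PySem.Dict.getD (PySem.Dict.mk p) "name" "")))
  if unscouted = [] then []
  else PySem.List.slice (PySem.List.sorted unscouted pvSortKey) none (some count)

-- ===== PORT B =====
-- loop body: 'if p.get("name","") not in already_scouted: buckets[_priority(p)].append(p)'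
def pvBuckStep (already_scouted : List String)
    (b : List (List (String × String)) × List (List (String × String)) × List (List (String × String)) × List (List (String × String)) × List (List (String × String)))
    (p : List (String × String)) :
    List (List (String × String)) × List (List (String × String)) × List (List (String × String)) × List (List (String × String)) × List (List (String × String)) :=
  if !(already_scouted.contains (PySem.Dict.getD (PySem.Dict.mk p) "name" "")) then
    let k := pvSortKey p
    if k = 0 then (b.1 ++ [p], b.2.1, b.2.2.1, b.2.2.2.1, b.2.2.2.2)
    else if k = 1 then (b.1, b.2.1 ++ [p], b.2.2.1, b.2.2.2.1, b.2.2.2.2)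
    else if k = 2 then (b.1, b.2.1, b.2.2.1 ++ [p], b.2.2.2.1, b.2.2.2.2)
    else if k = 3 then (b.1, b.2.1, b.2.2.1, b.2.2.2.1 ++ [p], b.2.2.2.2)
    else (b.1, b.2.1, b.2.2.1, b.2.2.2.1, b.2.2.2.2 ++ [p])
  else b

def pick_players_to_scout_alt (roster : List (List (String × String))) (already_scouted : List String) (count : Int) : List (List (String × String)) :=
  let bs := roster.foldl (pvBuckStep already_scouted) ([], [], [], [], [])
  let result := bs.1 ++ bs.2.1 ++ bs.2.2.1 ++ bs.2.2.2.1 ++ bs.2.2.2.2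
  PySem.List.slice result none (some count)

-- ===== PRECONDITION & SPEC =====
def Spec_pick_players_to_scout (roster : List (List (String × String))) (already_scouted : List String) (count : Int) (out : List (List (String × String))) : Prop := out = pick_players_to_scout_alt roster already_scouted count
instance (roster : List (List (String × String))) (already_scouted : List String) (count : Int) (out : List (List (String × String))) : Decidable (Spec_pick_players_to_scout roster already_scouted count out) := by unfold Spec_pick_players_to_scout; infer_instance

-- ===== CLAIM (what is proved, stated in full; the proofs are below) =====
def Claim_equal_pick_players_to_scout : Prop := ∀ (roster : List (List (String × String))) (already_scouted : List String) (count : Int), Dom_pick_players_to_scout roster already_scouted count → Spec_pick_players_to_scout roster already_scouted count (pick_players_to_scout roster already_scouted count)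

-- ===== LEMMAS AND PROOFS =====

theorem pvSortKey_cases (p : List (String × String)) :
    pvSortKey p = 0 ∨ pvSortKey p = 1 ∨ pvSortKey p = 2 ∨ pvSortKey p = 3 ∨ pvSortKey p = 4 := by
  simp only [pvSortKey, pvPrioLoop]
  split_ifs <;> simp

theorem pvInsertBy_split {α : Type} (before : α → α → Bool) (x : α) (l1 l2 : List α)
    (h1 : ∀ y ∈ l1, before x y = false) (h2 : ∀ y ∈ l2, before x y = true) :
    PySem.List.insertBy before x (l1 ++ l2) = l1 ++ x :: l2 := by
  induction l1 with
  | nil =>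
      cases l2 with
      | nil => simp [PySem.List.insertBy]
      | cons y ys => simp [PySem.List.insertBy, h2 y (by simp)]
  | cons a l1 ih =>
      have ha : before x a = false := h1 a (by simp)
      simp only [List.cons_append, PySem.List.insertBy, ha]
      simp [ih (fun y hy => h1 y (by simp [hy]))]

def pvF (j : Int) (xs : List (List (String × String))) : List (List (String × String)) :=
  xs.filter (fun a => decide (pvSortKey a = j))

theorem pvMem_F {j : Int} {xs : List (List (String × String))} {y : List (String × String)}
    (h : y ∈ pvF j xs) : pvSortKey y = j := by
  have := (List.mem_filter.1 h).2
  simpa using this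

theorem pvInsert_mid (x : List (String × String)) (j : Int) (hj : pvSortKey x = j)
    (l1 l2 : List (List (String × String)))
    (h1 : ∀ y ∈ l1, pvSortKey y ≤ j) (h2 : ∀ y ∈ l2, j < pvSortKey y) :
    PySem.List.insertBy (fun a b => decide (pvSortKey a < pvSortKey b)) x (l1 ++ l2) = l1 ++ x :: l2 := by
  apply pvInsertBy_split
  · intro y hy
    have := h1 y hy
    simp [hj]; omega
  · intro y hy
    have := h2 y hy
    simp [hj]; omega

theorem pvSorted_buckets (xs : List (List (String × String))) :
    PySem.List.sorted xs pvSortKey =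
      pvF 0 xs ++ pvF 1 xs ++ pvF 2 xs ++ pvF 3 xs ++ pvF 4 xs := by
  rw [PySem.List.sorted_eq_foldl_insertBy]
  induction xs using List.reverseRecOn with
  | nil => simp [pvF]
  | append_singleton ys x ih =>
      rw [List.foldl_append, List.foldl_cons, List.foldl_nil, ih]
      have hF : ∀ j : Int, pvF j (ys ++ [x]) = pvF j ys ++ (if pvSortKey x = j then [x] else []) := by
        intro j
        simp only [pvF, List.filter_append]
        by_cases h : pvSortKey x = j <;> simp [h]
      have hmem01 : ∀ y ∈ pvF 0 ys ++ pvF 1 ys, pvSortKey y ≤ 1 := by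
        intro y hy; rcases List.mem_append.1 hy with hy | hy <;> simp [pvMem_F hy]
      have hmem012 : ∀ y ∈ pvF 0 ys ++ pvF 1 ys ++ pvF 2 ys, pvSortKey y ≤ 2 := by
        intro y hy
        rcases List.mem_append.1 hy with hy | hy
        · rcases List.mem_append.1 hy with hy | hy <;> simp [pvMem_F hy]
        · simp [pvMem_F hy]
      have hmem0123 : ∀ y ∈ pvF 0 ys ++ pvF 1 ys ++ pvF 2 ys ++ pvF 3 ys, pvSortKey y ≤ 3 := by
        intro y hy
        rcases List.mem_append.1 hy with hy | hy
        · have := hmem012 y hy; omega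
        · simp [pvMem_F hy]
      have hmem34 : ∀ y ∈ pvF 3 ys ++ pvF 4 ys, 2 < pvSortKey y := by
        intro y hy; rcases List.mem_append.1 hy with hy | hy <;> simp [pvMem_F hy]
      have hmem234 : ∀ y ∈ pvF 2 ys ++ (pvF 3 ys ++ pvF 4 ys), 1 < pvSortKey y := by
        intro y hy
        rcases List.mem_append.1 hy with hy | hy
        · simp [pvMem_F hy]
        · have := hmem34 y hy; omega
      have hmem1234 : ∀ y ∈ pvF 1 ys ++ (pvF 2 ys ++ (pvF 3 ys ++ pvF 4 ys)), 0 < pvSortKey y := by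
        intro y hy
        rcases List.mem_append.1 hy with hy | hy
        · simp [pvMem_F hy]
        · have := hmem234 y hy; omega
      rcases pvSortKey_cases x with h | h | h | h | h
      · have e : pvF 0 ys ++ (pvF 1 ys ++ (pvF 2 ys ++ (pvF 3 ys ++ pvF 4 ys)))
            = pvF 0 ys ++ (pvF 1 ys ++ (pvF 2 ys ++ (pvF 3 ys ++ pvF 4 ys))) := rfl
        rw [show pvF 0 ys ++ pvF 1 ys ++ pvF 2 ys ++ pvF 3 ys ++ pvF 4 ys
            = pvF 0 ys ++ (pvF 1 ys ++ (pvF 2 ys ++ (pvF 3 ys ++ pvF 4 ys))) by simp,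
           pvInsert_mid x 0 h (pvF 0 ys) (pvF 1 ys ++ (pvF 2 ys ++ (pvF 3 ys ++ pvF 4 ys)))
             (fun y hy => by simp [pvMem_F hy]) hmem1234]
        simp [hF, h]
      · rw [show pvF 0 ys ++ pvF 1 ys ++ pvF 2 ys ++ pvF 3 ys ++ pvF 4 ys
            = (pvF 0 ys ++ pvF 1 ys) ++ (pvF 2 ys ++ (pvF 3 ys ++ pvF 4 ys)) by simp,
           pvInsert_mid x 1 h _ _ hmem01 hmem234]
        simp [hF, h]
      · rw [show pvF 0 ys ++ pvF 1 ys ++ pvF 2 ys ++ pvF 3 ys ++ pvF 4 ys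
            = (pvF 0 ys ++ pvF 1 ys ++ pvF 2 ys) ++ (pvF 3 ys ++ pvF 4 ys) by simp,
           pvInsert_mid x 2 h _ _ hmem012 hmem34]
        simp [hF, h]
      · rw [show pvF 0 ys ++ pvF 1 ys ++ pvF 2 ys ++ pvF 3 ys ++ pvF 4 ys
            = (pvF 0 ys ++ pvF 1 ys ++ pvF 2 ys ++ pvF 3 ys) ++ pvF 4 ys by simp,
           pvInsert_mid x 3 h _ _ hmem0123 (fun y hy => by simp [pvMem_F hy])]
        simp [hF, h]
      · rw [show pvF 0 ys ++ pvF 1 ys ++ pvF 2 ys ++ pvF 3 ys ++ pvF 4 ys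
            = (pvF 0 ys ++ pvF 1 ys ++ pvF 2 ys ++ pvF 3 ys ++ pvF 4 ys) ++ [] by simp]
        rw [pvInsert_mid x 4 h _ [] (fun y hy => by
              rcases List.mem_append.1 hy with hy | hy
              · have := hmem0123 y hy; omega
              · simp [pvMem_F hy])
            (fun y hy => by simp at hy)]
        simp [hF, h]

def pvG (sc : List String) (j : Int) (xs : List (List (String × String))) : List (List (String × String)) :=
  xs.filter (fun a => decide (pvSortKey a = j) && !(sc.contains (PySem.Dict.getD (PySem.Dict.mk a) "name" "")))

theorem pvFoldl_buckets (sc : List String) (xs : List (List (String × String))) :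
    ∀ b : List (List (String × String)) × List (List (String × String)) × List (List (String × String)) × List (List (String × String)) × List (List (String × String)),
      xs.foldl (pvBuckStep sc) b =
        (b.1 ++ pvG sc 0 xs, b.2.1 ++ pvG sc 1 xs, b.2.2.1 ++ pvG sc 2 xs, b.2.2.2.1 ++ pvG sc 3 xs, b.2.2.2.2 ++ pvG sc 4 xs) := by
  induction xs with
  | nil =>
      intro b
      obtain ⟨b0, b1, b2, b3, b4⟩ := b
      simp [pvG]
  | cons p rest ih =>
      intro b
      obtain ⟨b0, b1, b2, b3, b4⟩ := b
      rw [List.foldl_cons, ih]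
      by_cases hp : PySem.Dict.getD (PySem.Dict.mk p) "name" "" ∈ sc
      · simp [pvBuckStep, pvG, hp]
      · rcases pvSortKey_cases p with h | h | h | h | h <;>
          simp [pvBuckStep, pvG, hp, h]

-- ===== VERDICT (by name: the statement is the Claim_ definition above) =====
theorem pick_players_to_scout_spec : Claim_equal_pick_players_to_scout := by
  intro roster sc count _
  simp only [Spec_pick_players_to_scout, pick_players_to_scout, pick_players_to_scout_alt]
  rw [pvFoldl_buckets]
  have hG : ∀ j : Int,
      pvG sc j roster =
        pvF j (roster.filter (fun p => !(sc.contains (PySem.Dict.getD (PySem.Dict.mk p) "name" "")))) := by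
    intro j
    rw [pvF, List.filter_filter]
    rfl
  by_cases hu : roster.filter (fun p => !(sc.contains (PySem.Dict.getD (PySem.Dict.mk p) "name" ""))) = []
  · have hGnil : ∀ j : Int, pvG sc j roster = [] := by
      intro j; rw [hG, hu]; rfl
    rw [if_pos hu]
    simp only [hGnil, List.append_nil]
    simp [PySem.List.slice]
  · rw [if_neg hu, pvSorted_buckets]
    simp [hG]
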